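-- pv_equiv track=rewrite | github.com/brykalov69/lottery-designer-web | backend/services/generator.py | passes_group_limits
-- ===== SOURCE A (Python) =====
-- def passes_group_limits(combo, number_to_group, group_limits):
--     if not number_to_group or not group_limits:
--         return True
--
--     counts = {}
--     for n in combo:
--         g = number_to_group.get(n)
--         if g:
--             counts[g] = counts.get(g, 0) + 1
--
--     for g, limit in group_limits.items():
--         if limit is not None and counts.get(g, 0) > limit:
--             return False
--
--     return True
-- ===== SOURCE B (Python) =====
-- def passes_group_limits(combo, number_to_group, group_limits):
--     if not number_to_group or not group_limits:
--         return True
--     remaining = {}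
--     for g, limit in group_limits.items():
--         if limit is not None:
--             if limit < 0:
--                 return False
--             remaining[g] = limit
--     for n in combo:
--         g = number_to_group.get(n)
--         if g and g in remaining:
--             if remaining[g] == 0:
--                 return False
--             remaining[g] -= 1
--     return True
-- ===== Notes on version B (the rewrite author's own statement) =====
-- stated objective: alternative
-- what changed: B replaces A's count-then-check pipeline (build a full per-group counts dict over combo, then compare every count with its limit) by budget consumption: it turns the non-None limits into remaining budgets (rejecting negative limits up front), then makes one pass over combo decrementing budgets and fails on the first exhausted budget, never counting anything.
import Mathlib
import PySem

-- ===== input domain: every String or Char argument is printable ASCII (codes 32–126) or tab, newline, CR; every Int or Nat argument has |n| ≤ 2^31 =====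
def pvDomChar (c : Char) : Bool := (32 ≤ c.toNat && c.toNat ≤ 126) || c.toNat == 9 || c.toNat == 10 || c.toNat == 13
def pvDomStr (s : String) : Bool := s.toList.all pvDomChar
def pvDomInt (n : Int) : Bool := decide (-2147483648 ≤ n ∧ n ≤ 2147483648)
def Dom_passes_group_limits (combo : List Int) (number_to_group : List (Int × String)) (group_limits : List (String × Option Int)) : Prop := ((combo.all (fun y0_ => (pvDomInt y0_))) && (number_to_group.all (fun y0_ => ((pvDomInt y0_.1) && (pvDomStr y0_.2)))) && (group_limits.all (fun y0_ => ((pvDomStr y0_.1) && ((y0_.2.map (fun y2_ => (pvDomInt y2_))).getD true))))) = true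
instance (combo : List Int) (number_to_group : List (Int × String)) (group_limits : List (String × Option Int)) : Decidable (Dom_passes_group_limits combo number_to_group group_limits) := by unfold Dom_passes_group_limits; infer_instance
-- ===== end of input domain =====

-- B replaces A's count-then-check by a budget-consumption scan with early exit (alternative decomposition, same results).

-- dict.get(n) on the number_to_group association list (first match, None if absent); used by both Pythons
def ntgGet (number_to_group : List (Int × String)) (n : Int) : Option String :=
  (number_to_group.find? (fun p => p.1 == n)).map (·.2)

-- ===== PORT A =====
def passes_group_limits (combo : List Int) (number_to_group : List (Int × String)) (group_limits : List (String × Option Int)) : Bool :=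
  if number_to_group = [] || group_limits = [] then true
  else
    -- counts = {}; for n in combo: g = number_to_group.get(n); if g: counts[g] = counts.get(g,0)+1
    let counts : PySem.Dict String Int :=
      combo.foldl (fun d n =>
        match ntgGet number_to_group n with
        | some g => if g ≠ "" then d.modify g 0 (· + 1) else d
        | none => d) PySem.Dict.empty
    -- for g, limit in group_limits.items(): if limit is not None and counts.get(g, 0) > limit: return False
    !(group_limits.any (fun p =>
        match p.2 with
        | some limit => decide (counts.getD p.1 0 > limit)
        | none => false))

-- ===== PORT B =====
-- remaining = {}; for g, limit in group_limits.items(): if limit is not None: (if limit < 0: return False); remaining[g] = limit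
-- 'none' result = the early 'return False' on a negative limit
def pglBudgets : List (String × Option Int) → PySem.Dict String Int → Option (PySem.Dict String Int)
  | [], r => some r
  | (_, none) :: t, r => pglBudgets t r
  | (g, some l) :: t, r => if l < 0 then none else pglBudgets t (r.insert g l)

-- for n in combo: g = number_to_group.get(n); if g and g in remaining: (if remaining[g] == 0: return False); remaining[g] -= 1
def pglConsume (number_to_group : List (Int × String)) : List Int → PySem.Dict String Int → Bool
  | [], _ => true
  | n :: t, r =>
    match ntgGet number_to_group n with
    | some g =>
      if g ≠ "" then
        match r.get? g with
        | some v => if v = 0 then false else pglConsume number_to_group t (r.insert g (v - 1))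
        | none => pglConsume number_to_group t r
      else pglConsume number_to_group t r
    | none => pglConsume number_to_group t r

def passes_group_limits_alt (combo : List Int) (number_to_group : List (Int × String)) (group_limits : List (String × Option Int)) : Bool :=
  if number_to_group = [] || group_limits = [] then true
  else
    match pglBudgets group_limits PySem.Dict.empty with
    | none => false
    | some r => pglConsume number_to_group combo r

-- ===== PRECONDITION & SPEC =====
-- group_limits is a Python dict, so its keys are necessarily distinct; Pre_ only rules out association
-- lists with duplicate keys, which do not encode any Python input (nothing A returns on is excluded).
def Pre_passes_group_limits (combo : List Int) (number_to_group : List (Int × String)) (group_limits : List (String × Option Int)) : Prop :=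
  (group_limits.map Prod.fst).Nodup
instance (combo : List Int) (number_to_group : List (Int × String)) (group_limits : List (String × Option Int)) : Decidable (Pre_passes_group_limits combo number_to_group group_limits) := by unfold Pre_passes_group_limits; infer_instance

def pvWitness_passes_group_limits : List Int × (List (Int × String)) × (List (String × Option Int)) :=
  ([1, 2, 2], [(1, "a"), (2, "b")], [("a", some 1), ("b", some 2), ("c", none)])

def Spec_passes_group_limits (combo : List Int) (number_to_group : List (Int × String)) (group_limits : List (String × Option Int)) (out : Bool) : Prop := out = passes_group_limits_alt combo number_to_group group_limits
instance (combo : List Int) (number_to_group : List (Int × String)) (group_limits : List (String × Option Int)) (out : Bool) : Decidable (Spec_passes_group_limits combo number_to_group group_limits out) := by unfold Spec_passes_group_limits; infer_instance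

-- ===== CLAIM (what is proved, stated in full; the proofs are below) =====
def Claim_equal_passes_group_limits : Prop := ∀ (combo : List Int) (number_to_group : List (Int × String)) (group_limits : List (String × Option Int)), Dom_passes_group_limits combo number_to_group group_limits → Pre_passes_group_limits combo number_to_group group_limits → Spec_passes_group_limits combo number_to_group group_limits (passes_group_limits combo number_to_group group_limits)

-- ===== LEMMAS AND PROOFS =====

-- A's counting fold, looked up at g, equals the count of combo elements mapped to the truthy group g
theorem counts_getD (combo : List Int) (number_to_group : List (Int × String)) (g : String)
    (d : PySem.Dict String Int) :
    (combo.foldl (fun d n =>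
        match ntgGet number_to_group n with
        | some h => if h ≠ "" then d.modify h 0 (· + 1) else d
        | none => d) d).getD g 0
      = d.getD g 0 + (combo.countP (fun n => g ≠ "" && ntgGet number_to_group n == some g) : Int) := by
  induction combo generalizing d with
  | nil => simp
  | cons n t ih =>
    simp only [List.foldl_cons, List.countP_cons, ih]
    cases hlk : ntgGet number_to_group n with
    | none => simp
    | some h =>
      simp only []
      by_cases hh : h = ""
      · subst hh
        by_cases hg : g = ""
        · simp [hg]
        · simp [hg]
      · by_cases hgh : g = h
        · subst hgh
          simp [hh, PySem.Dict.getD_modify_self]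
          ring
        · simp [hh, PySem.Dict.getD_modify, hgh]
          exact fun _ hgg => hgh hgg.symm

-- abbreviation used only in the proofs: how often combo hits the (truthy) group g
def pglCnt (combo : List Int) (ntg : List (Int × String)) (g : String) : Int :=
  (combo.countP (fun n => g ≠ "" && ntgGet ntg n == some g) : Int)

-- pglBudgets returns none exactly when some entry carries a negative limit
theorem pglBudgets_none_iff (gl : List (String × Option Int)) (r : PySem.Dict String Int) :
    pglBudgets gl r = none ↔ ∃ p ∈ gl, ∃ l, p.2 = some l ∧ l < 0 := by
  induction gl generalizing r with
  | nil => simp [pglBudgets]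
  | cons q t ih =>
    obtain ⟨g, lo⟩ := q
    cases lo with
    | none => simp [pglBudgets, ih]
    | some l =>
      by_cases hl : l < 0
      · simp [pglBudgets, hl]
      · simp [pglBudgets, hl, ih]

-- on success, every limit in gl is nonnegative
theorem pglBudgets_nonneg (gl : List (String × Option Int)) (r r' : PySem.Dict String Int)
    (h : pglBudgets gl r = some r') : ∀ p ∈ gl, ∀ l, p.2 = some l → 0 ≤ l := by
  intro p hp l hl
  by_contra hneg
  have : pglBudgets gl r = none := (pglBudgets_none_iff gl r).2 ⟨p, hp, l, hl, by omega⟩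
  simp [this] at h

-- keys not mentioned in gl are untouched
theorem pglBudgets_get_notmem (gl : List (String × Option Int)) (r r' : PySem.Dict String Int)
    (h : pglBudgets gl r = some r') (g : String) (hg : g ∉ gl.map Prod.fst) :
    r'.get? g = r.get? g := by
  induction gl generalizing r with
  | nil => simp [pglBudgets] at h; rw [h]
  | cons q t ih =>
    obtain ⟨k, lo⟩ := q
    simp only [List.map_cons, List.mem_cons, not_or] at hg
    cases lo with
    | none => exact ih r (by simpa [pglBudgets] using h) hg.2
    | some l =>
      by_cases hl : l < 0
      · simp [pglBudgets, hl] at h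
      · have h' : pglBudgets t (r.insert k l) = some r' := by simpa [pglBudgets, hl] using h
        rw [ih (r.insert k l) h' hg.2, PySem.Dict.get?_insert_of_ne r l hg.1]

-- with distinct keys, each entry (g, some l) ends up as budget l
theorem pglBudgets_mem (gl : List (String × Option Int)) (r r' : PySem.Dict String Int)
    (h : pglBudgets gl r = some r') (hnd : (gl.map Prod.fst).Nodup)
    (g : String) (l : Int) (hmem : (g, some l) ∈ gl) : r'.get? g = some l := by
  induction gl generalizing r with
  | nil => simp at hmem
  | cons q t ih =>
    obtain ⟨k, lo⟩ := q
    simp only [List.map_cons, List.nodup_cons] at hnd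
    rcases List.mem_cons.1 hmem with heq | hmem'
    · injection heq with hk hl
      subst hk
      subst hl
      by_cases hlneg : l < 0
      · simp [pglBudgets, hlneg] at h
      · have h' : pglBudgets t (r.insert g l) = some r' := by simpa [pglBudgets, hlneg] using h
        rw [pglBudgets_get_notmem t _ r' h' g hnd.1, PySem.Dict.get?_insert_self]
    · cases lo with
      | none => exact ih r (by simpa [pglBudgets] using h) hnd.2 hmem'
      | some l0 =>
        by_cases hl : l0 < 0
        · simp [pglBudgets, hl] at h
        · exact ih (r.insert k l0) (by simpa [pglBudgets, hl] using h) hnd.2 hmem'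

-- every budget in the final dict came from some entry of gl (or was there initially)
theorem pglBudgets_get_mem (gl : List (String × Option Int)) (r r' : PySem.Dict String Int)
    (h : pglBudgets gl r = some r') (g : String) (l : Int) (hget : r'.get? g = some l) :
    (g, some l) ∈ gl ∨ r.get? g = some l := by
  induction gl generalizing r with
  | nil =>
    simp [pglBudgets] at h
    right
    rw [h]
    exact hget
  | cons q t ih =>
    obtain ⟨k, lo⟩ := q
    cases lo with
    | none =>
      rcases ih r (by simpa [pglBudgets] using h) with hm | hr
      · exact Or.inl (List.mem_cons_of_mem _ hm)
      · exact Or.inr hr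
    | some l0 =>
      by_cases hl : l0 < 0
      · simp [pglBudgets, hl] at h
      · rcases ih (r.insert k l0) (by simpa [pglBudgets, hl] using h) with hm | hr
        · exact Or.inl (List.mem_cons_of_mem _ hm)
        · by_cases hk : g = k
          · subst hk
            rw [PySem.Dict.get?_insert_self] at hr
            injection hr with hv
            subst hv
            exact Or.inl (by simp)
          · rw [PySem.Dict.get?_insert_of_ne r l0 hk] at hr
            exact Or.inr hr

-- counts are nonnegative
theorem pglCnt_nonneg (combo : List Int) (ntg : List (Int × String)) (g : String) :
    0 ≤ pglCnt combo ntg g := by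
  simp [pglCnt]

-- the budget scan succeeds iff no budget is exceeded by its (truthy-group) count
theorem pglConsume_iff (ntg : List (Int × String)) (combo : List Int) (r : PySem.Dict String Int)
    (hpos : ∀ g v, r.get? g = some v → 0 ≤ v) :
    pglConsume ntg combo r = true ↔
      ∀ g v, r.get? g = some v → pglCnt combo ntg g ≤ v := by
  induction combo generalizing r with
  | nil =>
    simp [pglConsume, pglCnt]
    intro g v h
    exact hpos g v h
  | cons n t ih =>
    have cnt_cons : ∀ g, pglCnt (n :: t) ntg g
        = pglCnt t ntg g + (if (g ≠ "" && ntgGet ntg n == some g) then 1 else 0) := by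
      intro g
      simp [pglCnt, List.countP_cons]
    cases hlk : ntgGet ntg n with
    | none =>
      have cnt_eq : ∀ g, pglCnt (n :: t) ntg g = pglCnt t ntg g := by
        intro g
        rw [cnt_cons, hlk]
        simp
      rw [pglConsume, hlk, ih r hpos]
      constructor
      · intro hyp g v hg
        rw [cnt_eq g]
        exact hyp g v hg
      · intro hyp g v hg
        have := hyp g v hg
        rw [cnt_eq g] at this
        exact this
    | some h =>
      by_cases hh : h = ""
      · subst hh
        have cnt_eq : ∀ g, pglCnt (n :: t) ntg g = pglCnt t ntg g := by
          intro g
          rw [cnt_cons, hlk]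
          by_cases hg' : g = ""
          · simp [hg']
          · have : ¬ ("" = g) := fun e => hg' e.symm
            simp [this]
        rw [pglConsume, hlk]
        simp only [ne_eq, not_true_eq_false, if_false]
        rw [ih r hpos]
        constructor
        · intro hyp g v hg
          rw [cnt_eq g]
          exact hyp g v hg
        · intro hyp g v hg
          have := hyp g v hg
          rw [cnt_eq g] at this
          exact this
      · have cnt_ne : ∀ g, g ≠ h → pglCnt (n :: t) ntg g = pglCnt t ntg g := by
          intro g hg
          rw [cnt_cons, hlk]
          have : ¬ (h = g) := fun e => hg e.symm
          simp [this]
        have cnt_h : pglCnt (n :: t) ntg h = pglCnt t ntg h + 1 := by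
          rw [cnt_cons, hlk]
          simp [hh]
        rw [pglConsume, hlk]
        simp only [ne_eq, hh, not_false_eq_true, if_true]
        cases hget : r.get? h with
        | none =>
          rw [ih r hpos]
          constructor
          · intro hyp g v hg
            have hg' : g ≠ h := by
              intro e
              subst e
              rw [hget] at hg
              cases hg
            rw [cnt_ne g hg']
            exact hyp g v hg
          · intro hyp g v hg
            have hg' : g ≠ h := by
              intro e
              subst e
              rw [hget] at hg
              cases hg
            have := hyp g v hg
            rw [cnt_ne g hg'] at this
            exact this
        | some v0 =>
          by_cases hv0 : v0 = 0
          · subst hv0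
            constructor
            · intro hfalse
              cases hfalse
            · intro hyp
              have h1 := hyp h 0 hget
              have h2 := pglCnt_nonneg t ntg h
              rw [cnt_h] at h1
              omega
          · simp only [hv0, if_false]
            have hpos' : ∀ g v, (r.insert h (v0 - 1)).get? g = some v → 0 ≤ v := by
              intro g v hg
              by_cases hg' : g = h
              · subst hg'
                rw [PySem.Dict.get?_insert_self] at hg
                injection hg with hv
                have := hpos g v0 hget
                omega
              · rw [PySem.Dict.get?_insert_of_ne r (v0 - 1) hg'] at hg
                exact hpos g v hg
            rw [ih _ hpos']
            constructor
            · intro hyp g v hg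
              by_cases hg' : g = h
              · subst hg'
                rw [hget] at hg
                injection hg with hv
                subst hv
                have := hyp g (v0 - 1) (by rw [PySem.Dict.get?_insert_self])
                rw [cnt_h]
                omega
              · have := hyp g v (by rw [PySem.Dict.get?_insert_of_ne r (v0 - 1) hg']; exact hg)
                rw [cnt_ne g hg']
                exact this
            · intro hyp g v hg
              by_cases hg' : g = h
              · subst hg'
                rw [PySem.Dict.get?_insert_self] at hg
                injection hg with hv
                subst hv
                have := hyp g v0 hget
                rw [cnt_h] at this
                omega
              · rw [PySem.Dict.get?_insert_of_ne r (v0 - 1) hg'] at hg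
                have := hyp g v hg
                rw [cnt_ne g hg'] at this
                exact this

-- A is true iff every non-None limit bounds its count
theorem portA_iff (combo : List Int) (ntg : List (Int × String)) (gl : List (String × Option Int))
    (h1 : ntg ≠ []) (h2 : gl ≠ []) :
    passes_group_limits combo ntg gl = true ↔
      ∀ p ∈ gl, ∀ l, p.2 = some l → pglCnt combo ntg p.1 ≤ l := by
  unfold passes_group_limits
  rw [if_neg (by simp [h1, h2])]
  simp only [Bool.not_eq_eq_eq_not, Bool.not_true, List.any_eq_false]
  constructor
  · intro h p hp l hl
    have := h p hp
    rw [hl] at this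
    simp only [counts_getD, PySem.Dict.getD_empty, zero_add, Bool.not_eq_true,
      decide_eq_false_iff_not, not_lt] at this
    exact this
  · intro h p hp
    cases hl : p.2 with
    | none => simp
    | some l =>
      have := h p hp l hl
      simp only [counts_getD, PySem.Dict.getD_empty, zero_add, Bool.not_eq_true,
        decide_eq_false_iff_not, not_lt]
      exact this

-- ===== VERDICT (by name: the statement is the Claim_ definition above) =====
theorem passes_group_limits_spec : Claim_equal_passes_group_limits := by
  intro combo ntg gl _ hpre
  unfold Spec_passes_group_limits
  by_cases hempty : ntg = [] ∨ gl = []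
  · rcases hempty with h | h <;>
      simp [passes_group_limits, passes_group_limits_alt, h]
  · rw [not_or] at hempty
    obtain ⟨h1, h2⟩ := hempty
    unfold passes_group_limits_alt
    rw [if_neg (by simp [h1, h2])]
    cases hb : pglBudgets gl PySem.Dict.empty with
    | none =>
      obtain ⟨p, hp, l, hl, hneg⟩ := (pglBudgets_none_iff gl PySem.Dict.empty).1 hb
      have hA : ¬ (passes_group_limits combo ntg gl = true) := by
        rw [portA_iff combo ntg gl h1 h2]
        intro h
        have := h p hp l hl
        have := pglCnt_nonneg combo ntg p.1
        omega
      simp only [Bool.not_eq_true] at hA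
      rw [hA]
    | some r =>
      have hnonneg : ∀ g v, r.get? g = some v → 0 ≤ v := by
        intro g v hg
        rcases pglBudgets_get_mem gl _ r hb g v hg with hm | hr
        · exact pglBudgets_nonneg gl _ r hb (g, some v) hm v rfl
        · rw [PySem.Dict.get?_empty] at hr; cases hr
      rw [Bool.eq_iff_iff]
      rw [portA_iff combo ntg gl h1 h2, pglConsume_iff ntg combo r hnonneg]
      constructor
      · intro h g v hg
        rcases pglBudgets_get_mem gl _ r hb g v hg with hm | hr
        · exact h (g, some v) hm v rfl
        · rw [PySem.Dict.get?_empty] at hr; cases hr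
      · intro h p hp l hl
        have hget : r.get? p.1 = some l := by
          apply pglBudgets_mem gl _ r hb hpre
          have : p = (p.1, some l) := by rw [← hl]
          rw [← this]; exact hp
        exact h p.1 l hget
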